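-- pv_equiv track=rewrite | github.com/bubugamer/CAMO | src/camo/runtime/consistency.py | resolve_action
-- ===== SOURCE A (Python) =====
-- from typing import Any
--
-- def resolve_action(issues: list[dict[str, Any]]) -> str:
--     if not issues:
--         return "accept"
--     if any(item.get("severity") == "high" for item in issues):
--         return "regenerate"
--     if any(item.get("severity") == "medium" for item in issues):
--         return "warn"
--     return "accept"
-- ===== SOURCE B (Python) =====
-- from typing import Any
--
-- def resolve_action(issues: list[dict[str, Any]]) -> str:
--     has_high = False
--     has_medium = False
--     for item in issues:
--         sev = item.get("severity")
--         if sev == "high":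
--             has_high = True
--         elif sev == "medium":
--             has_medium = True
--     if has_high:
--         return "regenerate"
--     if has_medium:
--         return "warn"
--     return "accept"
-- ===== Notes on version B (the rewrite author's own statement) =====
-- stated objective: alternative
-- what changed: Replaced A's two separate short-circuiting any() scans (plus an up-front emptiness check) with a single non-early-exit pass that accumulates has_high/has_medium flags, deciding the action afterwards from the flags.
import Mathlib
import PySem

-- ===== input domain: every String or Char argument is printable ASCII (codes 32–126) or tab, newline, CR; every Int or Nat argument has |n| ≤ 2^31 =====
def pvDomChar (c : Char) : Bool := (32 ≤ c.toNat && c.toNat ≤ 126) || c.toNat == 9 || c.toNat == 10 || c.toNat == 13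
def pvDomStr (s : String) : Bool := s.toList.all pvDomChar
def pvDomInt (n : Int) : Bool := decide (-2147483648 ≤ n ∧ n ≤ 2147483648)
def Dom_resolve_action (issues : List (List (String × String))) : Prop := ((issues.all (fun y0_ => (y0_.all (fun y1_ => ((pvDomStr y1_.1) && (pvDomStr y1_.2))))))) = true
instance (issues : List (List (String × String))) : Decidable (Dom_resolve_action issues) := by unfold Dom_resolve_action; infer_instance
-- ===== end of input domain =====

-- B replaces A's two short-circuiting any() scans with one flag-collecting pass; objective: alternative decomposition.
-- ===== PORT A =====
def resolve_action (issues : List (List (String × String))) : String :=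
  if issues = [] then "accept"
  else if issues.any (fun item => (PySem.Dict.mk item).get? "severity" == some "high") then "regenerate"
  else if issues.any (fun item => (PySem.Dict.mk item).get? "severity" == some "medium") then "warn"
  else "accept"

-- ===== PORT B =====
def resolve_action_alt (issues : List (List (String × String))) : String :=
  let flags := issues.foldl (fun (fl : Bool × Bool) item =>
    let sev := (PySem.Dict.mk item).get? "severity"
    if sev == some "high" then (true, fl.2)
    else if sev == some "medium" then (fl.1, true)
    else fl) (false, false)
  if flags.1 then "regenerate"
  else if flags.2 then "warn"
  else "accept"

-- ===== PRECONDITION & SPEC =====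
def Spec_resolve_action (issues : List (List (String × String))) (out : String) : Prop := out = resolve_action_alt issues
instance (issues : List (List (String × String))) (out : String) : Decidable (Spec_resolve_action issues out) := by unfold Spec_resolve_action; infer_instance

-- ===== CLAIM (what is proved, stated in full; the proofs are below) =====
def Claim_equal_resolve_action : Prop := ∀ (issues : List (List (String × String))), Dom_resolve_action issues → Spec_resolve_action issues (resolve_action issues)

-- ===== LEMMAS AND PROOFS =====

-- ===== VERDICT (by name: the statement is the Claim_ definition above) =====
theorem flags_spec (issues : List (List (String × String))) (h m : Bool) :
    issues.foldl (fun (fl : Bool × Bool) item =>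
      let sev := (PySem.Dict.mk item).get? "severity"
      if sev == some "high" then (true, fl.2)
      else if sev == some "medium" then (fl.1, true)
      else fl) (h, m)
    = (h || issues.any (fun item => (PySem.Dict.mk item).get? "severity" == some "high"),
       m || issues.any (fun item => (PySem.Dict.mk item).get? "severity" == some "medium")) := by
  induction issues generalizing h m with
  | nil => simp
  | cons item rest ih =>
    simp only [List.foldl_cons, List.any_cons]
    by_cases hh : ((PySem.Dict.mk item).get? "severity" == some "high") = true
    · simp only [hh, if_true, ih]
      have hm' : ((PySem.Dict.mk item).get? "severity" == some "medium") = false := by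
        rw [beq_iff_eq] at hh; simp [hh]
      simp [hm']
    · by_cases hm : ((PySem.Dict.mk item).get? "severity" == some "medium") = true
      · simp only [hh, hm, if_true, ih]
        simp [Bool.eq_false_iff.mpr hh]
      · simp only [hh, hm, ih]
        simp [Bool.eq_false_iff.mpr hh, Bool.eq_false_iff.mpr hm]

theorem resolve_action_spec : Claim_equal_resolve_action := by
  intro issues _
  unfold Spec_resolve_action resolve_action resolve_action_alt
  rw [flags_spec]
  cases issues with
  | nil => simp
  | cons a rest =>
    simp only [Bool.false_or]
    by_cases hh : ((a :: rest).any (fun item => (PySem.Dict.mk item).get? "severity" == some "high")) = true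
    · simp [hh]
    · by_cases hm : ((a :: rest).any (fun item => (PySem.Dict.mk item).get? "severity" == some "medium")) = true
      · simp [hh, hm]
      · simp [hh, hm]
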